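-- pv_equiv track=rewrite | github.com/jeanscom/LoginPage | Course/Python Program/08-Extras/problem8_2.py | is_berlanese
-- ===== SOURCE A (Python) =====
-- def is_berlanese(word):
--     vowels = "aeiou"
--     n = len(word)
--
--     for i in range(n):
--         if word[i] not in vowels:  # If the character is a consonant
--             if word[i] != 'n':  # If it's not 'n'
--                 # Check if it's the last character or the next character is not a vowel
--                 if i == n - 1 or word[i + 1] not in vowels:
--                     return False
--     return True
-- ===== SOURCE B (Python) =====
-- def is_berlanese(word):
--     # Stage 1: split the word into maximal consonant runs. `runs` collects the
--     # runs that are immediately followed by a vowel; `cur` ends as the trailing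
--     # run (the consonants after the last vowel, possibly empty).
--     runs = []
--     cur = []
--     for ch in word:
--         if ch in "aeiou":
--             runs.append(cur)
--             cur = []
--         else:
--             cur.append(ch)
--     # Stage 2: in a run followed by a vowel every char except the last must be
--     # 'n' (the last one is excused by the vowel); the trailing run must be all 'n'.
--     return all(all(c == 'n' for c in r[:-1]) for r in runs) \
--         and all(c == 'n' for c in cur)
-- ===== Notes on version B (the rewrite author's own statement) =====
-- stated objective: alternative
-- what changed: A scans each index and looks ahead past every non-n consonant; B instead splits the word into maximal consonant runs (a grouping pass) and then checks the runs: a run followed by a vowel must be all 'n' except its last character, the trailing run must be all 'n'.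
import Mathlib
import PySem

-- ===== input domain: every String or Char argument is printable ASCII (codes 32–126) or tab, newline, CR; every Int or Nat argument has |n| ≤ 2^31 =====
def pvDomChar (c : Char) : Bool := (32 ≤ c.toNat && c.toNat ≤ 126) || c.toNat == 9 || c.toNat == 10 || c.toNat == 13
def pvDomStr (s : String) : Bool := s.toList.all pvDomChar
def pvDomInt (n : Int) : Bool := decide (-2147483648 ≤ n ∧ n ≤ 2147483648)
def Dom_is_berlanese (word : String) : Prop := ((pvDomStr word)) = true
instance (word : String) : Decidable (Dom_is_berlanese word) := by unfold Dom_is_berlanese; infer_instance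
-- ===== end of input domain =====

-- B replaces A's index loop with per-consonant lookahead by a split-into-
-- consonant-runs pass followed by a per-run check; objective: alternative.


-- ===== PORT A =====
-- membership test `c in "aeiou"` (single char, so char membership)
def pvIsVowel (c : Char) : Bool := c == 'a' || c == 'e' || c == 'i' || c == 'o' || c == 'u'

-- A's `for i in range(n)` loop with early `return False`, transliterated as
-- index recursion; `word[i+1]` is only read when guarded (i ≠ n-1), via headD.
def pvALoop (cs : List Char) (i : Nat) : Bool :=
  if h : i < cs.length then
    if !pvIsVowel cs[i] then
      if cs[i] != 'n' then
        if i == cs.length - 1 || !pvIsVowel ((cs.drop (i+1)).headD ' ') then false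
        else pvALoop cs (i+1)
      else pvALoop cs (i+1)
    else pvALoop cs (i+1)
  else true
termination_by cs.length - i
decreasing_by all_goals omega

def is_berlanese (word : String) : Bool := pvALoop word.toList 0

-- ===== PORT B =====
-- B's stage 1: the for-loop that splits the word into maximal consonant runs,
-- as a foldl over (runs, cur).
def pvSplit (cs : List Char) : List (List Char) × List Char :=
  cs.foldl
    (fun (st : List (List Char) × List Char) ch =>
      if pvIsVowel ch then (st.1 ++ [st.2], []) else (st.1, st.2 ++ [ch]))
    ([], [])

-- B's stage 2: every run followed by a vowel is all-'n' except its last char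
-- (r[:-1] = dropLast); the trailing run is all 'n'.
def is_berlanese_alt (word : String) : Bool :=
  let st := pvSplit word.toList
  (st.1.all fun r => r.dropLast.all (· == 'n')) && st.2.all (· == 'n')

-- ===== PRECONDITION & SPEC =====
def Spec_is_berlanese (word : String) (out : Bool) : Prop := out = is_berlanese_alt word
instance (word : String) (out : Bool) : Decidable (Spec_is_berlanese word out) := by unfold Spec_is_berlanese; infer_instance

-- ===== CLAIM (what is proved, stated in full; the proofs are below) =====
def Claim_equal_is_berlanese : Prop := ∀ (word : String), Dom_is_berlanese word → Spec_is_berlanese word (is_berlanese word)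

-- ===== LEMMAS AND PROOFS =====
-- Common reference semantics: the rule read off directly from the word.
def pvGood : List Char → Bool
  | [] => true
  | c :: rest =>
    if pvIsVowel c then pvGood rest
    else if c == 'n' then pvGood rest
    else
      match rest with
      | [] => false
      | d :: _ => pvIsVowel d && pvGood rest

-- what B's final check owes to the not-yet-closed run `cur`, given the rest of the word
def pvPendOK (cur cs : List Char) : Bool :=
  match cs with
  | [] => cur.all (· == 'n')
  | c :: _ => if pvIsVowel c then cur.dropLast.all (· == 'n') else cur.all (· == 'n')

-- B's remaining computation, starting from an open run `cur`
def pvGoodCont (cur cs : List Char) : Bool :=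
  match cs with
  | [] => cur.all (· == 'n')
  | c :: rest =>
    if pvIsVowel c then cur.dropLast.all (· == 'n') && pvGoodCont [] rest
    else pvGoodCont (cur ++ [c]) rest

theorem pvPendOK_nil (cs : List Char) : pvPendOK [] cs = true := by
  cases cs with
  | nil => simp [pvPendOK]
  | cons c rest => by_cases hv : pvIsVowel c = true <;> simp [pvPendOK, hv]

theorem pvALoop_eq_pvGood (k : Nat) : ∀ (cs : List Char) (i : Nat),
    cs.length - i ≤ k → pvALoop cs i = pvGood (cs.drop i) := by
  induction k with
  | zero =>
    intro cs i h
    have hge : ¬ i < cs.length := by omega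
    rw [pvALoop, dif_neg hge, List.drop_eq_nil_of_le (by omega), pvGood]
  | succ k ih =>
    intro cs i h
    by_cases hlt : i < cs.length
    · have hdrop : cs.drop i = cs[i] :: cs.drop (i+1) := List.drop_eq_getElem_cons hlt
      rw [pvALoop, dif_pos hlt, hdrop]
      by_cases hv : pvIsVowel cs[i] = true
      · simp [pvGood, hv, ih cs (i+1) (by omega)]
      · by_cases hn : cs[i] = 'n'
        · simp [pvGood, pvIsVowel, hn, ih cs (i+1) (by omega)]
        · by_cases hlt2 : i + 1 < cs.length
          · have hb : (i == cs.length - 1) = false := beq_eq_false_iff_ne.mpr (by omega)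
            have hdrop2 : cs.drop (i+1) = cs[i+1] :: cs.drop (i+2) :=
              List.drop_eq_getElem_cons hlt2
            have hget : cs[i+1]? = some (cs[i+1]'hlt2) := List.getElem?_eq_getElem hlt2
            rw [hdrop2]
            by_cases hv2 : pvIsVowel cs[i+1] = true
            · have := ih cs (i+1) (by omega)
              rw [hdrop2] at this
              simp [pvGood, hv, hn, hb, hget, hv2, this]
            · simp [pvGood, hv, hn, hb, hget, hv2]
          · have hb : (i == cs.length - 1) = true := beq_iff_eq.mpr (by omega)
            have hnil : cs.drop (i+1) = [] := List.drop_eq_nil_of_le (by omega)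
            rw [hnil]
            simp [pvGood, hv, hn, hb]
    · have hnil : cs.drop i = [] := List.drop_eq_nil_of_le (by omega)
      rw [pvALoop, dif_neg hlt, hnil, pvGood]

theorem pvFold_eq_goodCont : ∀ (cs : List Char) (runs : List (List Char)) (cur : List Char),
    (let st := cs.foldl
      (fun (st : List (List Char) × List Char) ch =>
        if pvIsVowel ch then (st.1 ++ [st.2], []) else (st.1, st.2 ++ [ch]))
      (runs, cur)
     (st.1.all fun r => r.dropLast.all (· == 'n')) && st.2.all (· == 'n'))
    = ((runs.all fun r => r.dropLast.all (· == 'n')) && pvGoodCont cur cs) := by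
  intro cs
  induction cs with
  | nil => intro runs cur; simp [pvGoodCont]
  | cons c rest ih =>
    intro runs cur
    by_cases hv : pvIsVowel c = true
    · simp only [List.foldl_cons, hv, if_pos, pvGoodCont, ih]
      simp [Bool.and_assoc]
    · simp only [List.foldl_cons, hv, pvGoodCont, ih]
      simp

theorem pvGoodCont_eq (cs : List Char) : ∀ (cur : List Char),
    pvGoodCont cur cs = (pvPendOK cur cs && pvGood cs) := by
  induction cs with
  | nil => intro cur; simp [pvGoodCont, pvPendOK, pvGood]
  | cons c rest ih =>
    intro cur
    by_cases hv : pvIsVowel c = true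
    · have hl : pvGoodCont cur (c :: rest)
          = ((cur.dropLast.all (· == 'n')) && pvGoodCont [] rest) := by
        simp [pvGoodCont, hv]
      rw [hl, ih, pvPendOK_nil]
      simp [pvPendOK, pvGood, hv]
    · have hl : pvGoodCont cur (c :: rest) = pvGoodCont (cur ++ [c]) rest := by
        simp [pvGoodCont, hv]
      have hq : pvPendOK cur (c :: rest) = cur.all (· == 'n') := by
        simp [pvPendOK, hv]
      by_cases hn : c = 'n'
      · subst hn
        have hp : pvPendOK (cur ++ ['n']) rest = cur.all (· == 'n') := by
          cases rest with
          | nil => simp [pvPendOK]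
          | cons d r => by_cases hvd : pvIsVowel d = true <;> simp [pvPendOK, hvd]
        have hg : pvGood ('n' :: rest) = pvGood rest := by
          simp [pvGood, hv]
        rw [hl, ih, hp, hq, hg]
      · rw [hl, ih, hq]
        cases rest with
        | nil => simp [pvPendOK, pvGood, hv, hn]
        | cons d r =>
          have hg : pvGood (c :: d :: r) = (pvIsVowel d && pvGood (d :: r)) := by
            simp [pvGood, hv, hn]
          rw [hg]
          by_cases hvd : pvIsVowel d = true <;>
            simp [pvPendOK, hvd, hn, Bool.and_assoc]

-- ===== VERDICT (by name: the statement is the Claim_ definition above) =====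
theorem is_berlanese_spec : Claim_equal_is_berlanese := by
  intro word _
  unfold Spec_is_berlanese is_berlanese is_berlanese_alt pvSplit
  rw [pvFold_eq_goodCont, pvGoodCont_eq,
      pvALoop_eq_pvGood word.toList.length word.toList 0 (by omega)]
  simp [pvPendOK_nil]
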